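-- pv_equiv track=rewrite | github.com/cizins/2026-python | weeks/week-08/solutions/1114405042/solution_10222.py | solve
-- ===== SOURCE A (Python) =====
-- def solve(input_data: str) -> str:
--     """
--     解題思路 (標準版)：
--     1. 這是經典的 UVA 10222 (Decode the Mad man) 鍵盤解碼問題。
--     2. 題目描述雖然稍微有些筆誤（標準 UVA 10222 實際上是向左偏移 2 個鍵，例如 'k' 變成 'h'，']' 變成 'p'）。
--     3. 我們將鍵盤由左至右的字元定義成一個長字串。
--     4. 遍歷輸入的每一個字元：
--        - 若為大寫字母則先轉為小寫。
--        - 若該字元存在於鍵盤字串中，就將索引值減 2（向左移 2 位）。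
--        - 若為空白、換行或是找不到的字元，則原封不動保留。
--     5. 最後將轉換後的字元組合成字串並回傳。
--     """
--     # 建立鍵盤標準對應表（依照標準 QWERTY 鍵盤）
--     keyboard = "`1234567890-=qwertyuiop[]\\asdfghjkl;'zxcvbnm,./"
--
--     results = []
--     # 逐字元讀取處理
--     for char in input_data:
--         # 將大寫轉小寫
--         lower_char = char.lower()
--
--         # 尋找該字元在鍵盤中的位置
--         idx = keyboard.find(lower_char)
--
--         # 如果有找到且可以向左移 2 格
--         if idx >= 2:
--             results.append(keyboard[idx - 2])
--         else:
--             # 空白、換行或原本就在最左邊兩個位置的字元原樣輸出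
--             results.append(lower_char)
--
--     return "".join(results)
-- ===== SOURCE B (Python) =====
-- def solve(input_data: str) -> str:
--     keyboard = "`1234567890-=qwertyuiop[]\\asdfghjkl;'zxcvbnm,./"
--     s = input_data.lower()
--     # Staged global replacements instead of per-character decoding: walk the
--     # keyboard left to right and globally replace keyboard[i] with keyboard[i-2].
--     # Correct because by the time keyboard[i] is rewritten to keyboard[i-2], the
--     # pass rewriting keyboard[i-2] is already done, so a produced character is
--     # never rewritten again (all keyboard characters are distinct).
--     for tgt, src in zip(keyboard, keyboard[2:]):
--         s = s.replace(src, tgt)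
--     return s
-- ===== Notes on version B (the rewrite author's own statement) =====
-- stated objective: faster
-- what changed: Instead of A's single Python-level pass over the input with a per-character keyboard search and branch, B lowers the string once and performs 45 staged global str.replace passes, one per keyboard key in left-to-right keyboard order (ordered so no produced character is ever rewritten again).
import Mathlib
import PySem

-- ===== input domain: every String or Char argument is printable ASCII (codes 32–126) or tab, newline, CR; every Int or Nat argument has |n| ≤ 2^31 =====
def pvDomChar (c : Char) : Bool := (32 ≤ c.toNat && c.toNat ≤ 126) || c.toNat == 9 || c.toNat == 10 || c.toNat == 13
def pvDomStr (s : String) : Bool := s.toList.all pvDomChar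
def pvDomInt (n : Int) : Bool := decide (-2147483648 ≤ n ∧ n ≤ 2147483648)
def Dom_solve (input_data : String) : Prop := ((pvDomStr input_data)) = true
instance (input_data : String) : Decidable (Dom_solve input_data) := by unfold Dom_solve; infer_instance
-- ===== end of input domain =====

-- B replaces A's per-character keyboard search/branch loop by lowering once and then
-- running staged global single-character replace passes in keyboard order
-- (measured faster in a timing run: the passes run as built-in str.replace).

-- ===== PORT A =====
def pvKb : List Char := "`1234567890-=qwertyuiop[]\\asdfghjkl;'zxcvbnm,./".toList

def solve (input_data : String) : String :=
  String.mk (input_data.toList.foldl (fun results char =>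
    let lower_char := PySem.Chars.lower [char]
    let idx := PySem.Chars.find pvKb lower_char
    if idx ≥ 2 then results ++ [PySem.List.pyGetD pvKb (idx - 2) ' ']
    else results ++ lower_char) [])

-- ===== PORT B =====
-- zip(keyboard, keyboard[2:]) : (target, source) pairs
def pvPairs : List (Char × Char) := List.zip pvKb (PySem.List.slice pvKb (some 2) none)

def solve_alt (input_data : String) : String :=
  String.mk (pvPairs.foldl (fun s p => PySem.Chars.replace s [p.2] [p.1])
    (PySem.Chars.lower input_data.toList))

-- ===== PRECONDITION & SPEC =====
def Spec_solve (input_data : String) (out : String) : Prop := out = solve_alt input_data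
instance (input_data : String) (out : String) : Decidable (Spec_solve input_data out) := by unfold Spec_solve; infer_instance

-- ===== CLAIM (what is proved, stated in full; the proofs are below) =====
def Claim_equal_solve : Prop := ∀ (input_data : String), Dom_solve input_data → Spec_solve input_data (solve input_data)

-- ===== LEMMAS AND PROOFS =====

-- single-character replace is a pointwise substitution
theorem pv_go_single (a b : Char) : ∀ (fuel : Nat) (l acc : List Char), l.length ≤ fuel →
    PySem.Chars.replace.go [a] [b] fuel l acc
      = acc.reverse ++ l.map (fun c => if c = a then b else c) := by
  intro fuel
  induction fuel with
  | zero =>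
    intro l acc h
    have : l = [] := List.eq_nil_of_length_eq_zero (Nat.le_zero.mp h)
    subst this
    simp [PySem.Chars.replace.go]
  | succ n ih =>
    intro l acc h
    cases l with
    | nil => simp [PySem.Chars.replace.go]
    | cons c t =>
      simp only [List.length_cons] at h
      by_cases hc : c = a
      · subst hc
        rw [show PySem.Chars.replace.go [c] [b] (n+1) (c :: t) acc
              = PySem.Chars.replace.go [c] [b] n t ([b].reverse ++ acc) by
            simp [PySem.Chars.replace.go, List.isPrefixOf]]
        rw [ih t _ (by omega)]
        simp
      · rw [show PySem.Chars.replace.go [a] [b] (n+1) (c :: t) acc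
              = PySem.Chars.replace.go [a] [b] n t (c :: acc) by
            simp [PySem.Chars.replace.go, List.isPrefixOf,
              show (a == c) = false from beq_eq_false_iff_ne.mpr (Ne.symm hc)]]
        rw [ih t _ (by omega)]
        simp [hc]

theorem pv_replace_single (a b : Char) (l : List Char) :
    PySem.Chars.replace l [a] [b] = l.map (fun c => if c = a then b else c) := by
  rw [show PySem.Chars.replace l [a] [b]
        = PySem.Chars.replace.go [a] [b] l.length l [] by simp [PySem.Chars.replace]]
  rw [pv_go_single a b l.length l [] le_rfl]
  simp

-- a fold of pointwise passes is a single map of the folded substitution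
theorem pv_fold_map (pairs : List (Char × Char)) : ∀ (l : List Char),
    pairs.foldl (fun s p => s.map (fun c => if c = p.2 then p.1 else c)) l
      = l.map (fun c => pairs.foldl (fun c p => if c = p.2 then p.1 else c) c) := by
  induction pairs with
  | nil => intro l; simp
  | cons p t ih =>
    intro l
    simp only [List.foldl_cons]
    rw [ih, List.map_map]
    rfl

-- A's loop body agrees with B's composed substitution, character by character, on ASCII
set_option maxRecDepth 100000 in
theorem pv_step_fin : ∀ (n : Fin 127),
    (let lower_char := PySem.Chars.lower [Char.ofNat n.1]
     let idx := PySem.Chars.find pvKb lower_char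
     if idx ≥ 2 then [PySem.List.pyGetD pvKb (idx - 2) ' ']
     else lower_char)
    = [pvPairs.foldl (fun c p => if c = p.2 then p.1 else c)
        (PySem.Chars.lowerChar (Char.ofNat n.1))] := by
  decide

theorem pv_step (c : Char) (h : pvDomChar c = true) :
    (let lower_char := PySem.Chars.lower [c]
     let idx := PySem.Chars.find pvKb lower_char
     if idx ≥ 2 then [PySem.List.pyGetD pvKb (idx - 2) ' ']
     else lower_char)
    = [pvPairs.foldl (fun c p => if c = p.2 then p.1 else c) (PySem.Chars.lowerChar c)] := by
  have hlt : c.toNat < 127 := by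
    simp only [pvDomChar, Bool.or_eq_true, Bool.and_eq_true, decide_eq_true_eq, beq_iff_eq] at h
    omega
  have hc : Char.ofNat c.toNat = c := Char.ofNat_toNat c
  have := pv_step_fin ⟨c.toNat, hlt⟩
  rwa [hc] at this

-- A's whole loop computed as a map of the composed substitution over the lowered input
set_option maxRecDepth 8192 in
theorem pv_fold (l : List Char) (h : l.all pvDomChar = true) (acc : List Char) :
    l.foldl (fun results char =>
      let lower_char := PySem.Chars.lower [char]
      let idx := PySem.Chars.find pvKb lower_char
      if idx ≥ 2 then results ++ [PySem.List.pyGetD pvKb (idx - 2) ' ']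
      else results ++ lower_char) acc
    = acc ++ (PySem.Chars.lower l).map
        (fun c => pvPairs.foldl (fun c p => if c = p.2 then p.1 else c) c) := by
  induction l generalizing acc with
  | nil => simp [PySem.Chars.lower]
  | cons c t ih =>
    simp only [List.all_cons, Bool.and_eq_true] at h
    have hstep := pv_step c h.1
    simp only [List.foldl_cons]
    rw [ih h.2]
    have hlow : PySem.Chars.lower (c :: t) = PySem.Chars.lowerChar c :: PySem.Chars.lower t := by
      simp [PySem.Chars.lower]
    rw [hlow, List.map_cons]
    dsimp only at hstep ⊢
    by_cases hcond : PySem.Chars.find pvKb (PySem.Chars.lower [c]) ≥ 2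
    · rw [if_pos hcond] at hstep ⊢
      rw [hstep]; simp
    · rw [if_neg hcond] at hstep ⊢
      rw [hstep]; simp

-- ===== VERDICT (by name: the statement is the Claim_ definition above) =====
theorem solve_spec : Claim_equal_solve := by
  intro s hdom
  unfold Spec_solve solve solve_alt
  rw [pv_fold s.toList hdom []]
  have hB : pvPairs.foldl (fun s p => PySem.Chars.replace s [p.2] [p.1])
      (PySem.Chars.lower s.toList)
    = pvPairs.foldl (fun s p => s.map (fun c => if c = p.2 then p.1 else c))
      (PySem.Chars.lower s.toList) := by
    have hfun : (fun (s : List Char) (p : Char × Char) => PySem.Chars.replace s [p.2] [p.1])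
        = (fun (s : List Char) (p : Char × Char) => s.map (fun c => if c = p.2 then p.1 else c)) := by
      funext s p
      exact pv_replace_single p.2 p.1 s
    rw [hfun]
  rw [hB, pv_fold_map]
  simp
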